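-- pv_equiv track=rewrite | github.com/Applied-Artificial-Intelligence-Eurecat/AquaSPICE-DataQA | data-qa/src/auxiliar_functions.py | return_observedAt
-- ===== SOURCE A (Python) =====
-- def return_observedAt(reading, properties):
--     '''
--     Func to return the first observedAt that is found
--     # Use time_index if available?
--     '''
--     observedAt = None
--
--     for property in properties:
--         try:
--             observedAt = reading[property]["observedAt"]
--         except:
--             pass
--
--     return str(observedAt).split(".")[0] + "Z"
-- ===== SOURCE B (Python) =====
-- def return_observedAt(reading, properties):
--     observedAt = None
--     for property in reversed(list(properties)):
--         try:
--             observedAt = reading[property]["observedAt"]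
--             break
--         except:
--             pass
--     return str(observedAt).split(".")[0] + "Z"
-- ===== Notes on version B (the rewrite author's own statement) =====
-- stated objective: idiomatic
-- what changed: B scans the properties in reverse and stops at the first successful lookup (first success in reverse = last success forward), instead of A's full forward scan that keeps overwriting the captured value.
import Mathlib
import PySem

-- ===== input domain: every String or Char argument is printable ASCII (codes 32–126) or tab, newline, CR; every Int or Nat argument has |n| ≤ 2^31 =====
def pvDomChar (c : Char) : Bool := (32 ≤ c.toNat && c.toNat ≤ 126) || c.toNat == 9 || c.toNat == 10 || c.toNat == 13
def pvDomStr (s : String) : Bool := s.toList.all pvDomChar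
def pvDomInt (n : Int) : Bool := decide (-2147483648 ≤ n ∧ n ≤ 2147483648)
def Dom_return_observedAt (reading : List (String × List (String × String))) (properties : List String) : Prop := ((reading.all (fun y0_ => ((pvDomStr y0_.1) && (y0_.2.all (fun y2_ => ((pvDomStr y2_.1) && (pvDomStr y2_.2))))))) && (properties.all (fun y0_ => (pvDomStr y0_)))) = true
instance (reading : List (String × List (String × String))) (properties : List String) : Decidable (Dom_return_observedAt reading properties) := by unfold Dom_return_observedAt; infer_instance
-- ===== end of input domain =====

-- B scans the properties in reverse and returns at the first successful lookup (first success in reverse = last success forward), instead of A's full overwrite scan; idiomatic, same output everywhere.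


-- ===== PORT A =====
-- reading[property]["observedAt"]: both dict lookups, none = KeyError (caught by the bare except)
def pvLookupObs (reading : List (String × List (String × String))) (p : String) : Option String :=
  match (PySem.Dict.mk reading).get? p with
  | none => none
  | some inner => (PySem.Dict.mk inner).get? "observedAt"

-- str(observedAt).split(".")[0] + "Z"  (str(None) = "None"; split "." is never empty)
def pvFmtObs (o : Option String) : String :=
  (((PySem.Str.split? (match o with | none => "None" | some v => v) ".").getD []).headD "") ++ "Z"

def return_observedAt (reading : List (String × List (String × String))) (properties : List String) : String :=
  pvFmtObs (properties.foldl (fun acc p =>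
    match pvLookupObs reading p with
    | some v => some v
    | none => acc) none)

-- ===== PORT B =====
-- first successful lookup scanning the reversed property list, stopping at the break
def pvFirstObs (reading : List (String × List (String × String))) : List String → Option String
  | [] => none
  | p :: rest =>
    match pvLookupObs reading p with
    | some v => some v
    | none => pvFirstObs reading rest

def return_observedAt_alt (reading : List (String × List (String × String))) (properties : List String) : String :=
  pvFmtObs (pvFirstObs reading properties.reverse)

-- ===== PRECONDITION & SPEC =====
def Spec_return_observedAt (reading : List (String × List (String × String))) (properties : List String) (out : String) : Prop := out = return_observedAt_alt reading properties
instance (reading : List (String × List (String × String))) (properties : List String) (out : String) : Decidable (Spec_return_observedAt reading properties out) := by unfold Spec_return_observedAt; infer_instance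

-- ===== CLAIM (what is proved, stated in full; the proofs are below) =====
def Claim_equal_return_observedAt : Prop := ∀ (reading : List (String × List (String × String))) (properties : List String), Dom_return_observedAt reading properties → Spec_return_observedAt reading properties (return_observedAt reading properties)

-- ===== LEMMAS AND PROOFS =====
theorem pvFirstObs_append (reading : List (String × List (String × String)))
    (l : List String) (p : String) :
    pvFirstObs reading (l ++ [p]) =
      (match pvFirstObs reading l with
       | some v => some v
       | none => pvLookupObs reading p) := by
  induction l with
  | nil =>
    simp only [List.nil_append, pvFirstObs]
    cases pvLookupObs reading p <;> rfl
  | cons q l ih =>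
    simp only [List.cons_append, pvFirstObs, ih]
    cases pvLookupObs reading q <;> rfl

theorem pv_foldl_eq_firstObs_reverse (reading : List (String × List (String × String)))
    (ps : List String) (acc : Option String) :
    ps.foldl (fun acc p =>
      match pvLookupObs reading p with
      | some v => some v
      | none => acc) acc =
      (match pvFirstObs reading ps.reverse with
       | some v => some v
       | none => acc) := by
  induction ps generalizing acc with
  | nil => simp [pvFirstObs]
  | cons p ps ih =>
    simp only [List.foldl_cons, ih, List.reverse_cons, pvFirstObs_append]
    cases pvFirstObs reading ps.reverse <;> cases pvLookupObs reading p <;> rfl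

-- ===== VERDICT (by name: the statement is the Claim_ definition above) =====
theorem return_observedAt_spec : Claim_equal_return_observedAt := by
  intro reading properties _
  unfold Spec_return_observedAt return_observedAt return_observedAt_alt
  rw [pv_foldl_eq_firstObs_reverse]
  cases pvFirstObs reading properties.reverse <;> rfl
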